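-- pv_equiv track=rewrite | github.com/priyanshsaxena24/Algo_Visualizer | app.py | heap_sort_with_steps
-- ===== SOURCE A (Python) =====
-- def heap_sort_with_steps(arr):
--     steps = []
--
--     def heapify(arr, n, i):
--         largest = i
--         left = 2 * i + 1
--         right = 2 * i + 2
--
--         if left < n and arr[left] > arr[largest]:
--             largest = left
--         if right < n and arr[right] > arr[largest]:
--             largest = right
--         if largest != i:
--             arr[i], arr[largest] = arr[largest], arr[i]
--             heapify(arr, n, largest)
--
--     def heap_sort(arr):
--         n = len(arr)
--         for i in range(n // 2 - 1, -1, -1):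
--             heapify(arr, n, i)
--             steps.append(arr[:])
--
--         for i in range(n - 1, 0, -1):
--             arr[i], arr[0] = arr[0], arr[i]
--             heapify(arr, i, 0)
--             steps.append(arr[:])
--
--     heap_sort(arr)
--     return arr, steps
-- ===== SOURCE B (Python) =====
-- def heap_sort_with_steps(arr):
--     # Floyd-style sift-down: lift the root out, shift larger children up the
--     # path of a "hole", then drop the value in -- one write per level instead
--     # of a full swap, same resulting array after each sift.
--     steps = []
--
--     def sift_down(a, n, i):
--         v = a[i]
--         j = i
--         child = 2 * j + 1
--         while child < n:
--             r = child + 1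
--             if r < n and a[r] > a[child]:
--                 child = r
--             if a[child] <= v:
--                 break
--             a[j] = a[child]
--             j = child
--             child = 2 * j + 1
--         a[j] = v
--
--     n = len(arr)
--     for i in range(n // 2 - 1, -1, -1):
--         sift_down(arr, n, i)
--         steps.append(arr[:])
--     for end in range(n - 1, 0, -1):
--         arr[end], arr[0] = arr[0], arr[end]
--         sift_down(arr, end, 0)
--         steps.append(arr[:])
--     return arr, steps
-- ===== Notes on version B (the rewrite author's own statement) =====
-- stated objective: alternative
-- what changed: heapify's swap-chain recursion is replaced by Floyd's hole method: the root value is lifted out once, larger children are shifted up along the sift path (one write per level instead of a full swap), and the value is dropped into its final slot; the flat driver loops replace the nested heap_sort closure.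
import Mathlib
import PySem

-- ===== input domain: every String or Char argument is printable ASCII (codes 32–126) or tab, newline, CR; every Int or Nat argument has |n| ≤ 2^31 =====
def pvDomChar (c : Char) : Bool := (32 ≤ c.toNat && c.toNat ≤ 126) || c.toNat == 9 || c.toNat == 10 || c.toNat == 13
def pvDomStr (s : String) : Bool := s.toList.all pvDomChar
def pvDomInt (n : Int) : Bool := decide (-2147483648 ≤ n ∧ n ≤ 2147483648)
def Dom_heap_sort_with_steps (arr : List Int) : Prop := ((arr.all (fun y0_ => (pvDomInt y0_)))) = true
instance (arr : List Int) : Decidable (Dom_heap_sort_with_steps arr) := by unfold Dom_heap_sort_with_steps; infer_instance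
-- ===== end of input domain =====

-- B replaces heapify's recursive swap chain with Floyd's hole-style sift-down (shift larger
-- children up, write the lifted value once) and flattens the nested heap_sort closure into
-- two plain loops; the array after each sift is identical, hence equal snapshot lists.
-- Both A and B mutate `arr` in place in Python (identically); the equivalence proved is
-- about the returned value.

-- ===== PORT A =====
-- heapify(arr, n, i): recursive swap-down. All Python indexing is in range
-- (i, largest < n <= len(arr)), so List.getD / List.set are exact here.
def heapifyA (arr : List Int) (n i : Nat) : List Int :=
  let left := 2 * i + 1
  let right := 2 * i + 2
  let l1 := if left < n ∧ arr.getD left 0 > arr.getD i 0 then left else i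
  let largest := if right < n ∧ arr.getD right 0 > arr.getD l1 0 then right else l1
  if largest ≠ i then
    heapifyA ((arr.set i (arr.getD largest 0)).set largest (arr.getD i 0)) n largest
  else arr
termination_by n - i
decreasing_by
  simp only [largest, l1, left, right] at *
  split_ifs at * <;> omega

-- for i in range(n//2 - 1, -1, -1): fuel f counts remaining iterations, current index is f-1
def pass1A (n : Nat) : Nat → List Int → List (List Int) → List Int × List (List Int)
  | 0, arr, steps => (arr, steps)
  | k + 1, arr, steps =>
      let arr' := heapifyA arr n k
      pass1A n k arr' (steps ++ [arr'])

-- for i in range(n-1, 0, -1): fuel f = current index i (down to 1); swap arr[i],arr[0] first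
def pass2A : Nat → List Int → List (List Int) → List Int × List (List Int)
  | 0, arr, steps => (arr, steps)
  | k + 1, arr, steps =>
      let arr1 := (arr.set (k + 1) (arr.getD 0 0)).set 0 (arr.getD (k + 1) 0)
      let arr2 := heapifyA arr1 (k + 1) 0
      pass2A k arr2 (steps ++ [arr2])

def heap_sort_with_steps (arr : List Int) : List Int × List (List Int) :=
  let n := arr.length
  let st1 := pass1A n (n / 2) arr []
  pass2A (n - 1) st1.1 st1.2

-- ===== PORT B =====
-- the while-loop of sift_down: j is the hole, v the lifted-out value; on break (or no
-- child) the value is written back: a.set j v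
def siftLoopB (a : List Int) (n j : Nat) (v : Int) : List Int :=
  let child := 2 * j + 1
  if child < n then
    let c := if child + 1 < n ∧ a.getD (child + 1) 0 > a.getD child 0 then child + 1 else child
    if a.getD c 0 ≤ v then a.set j v
    else siftLoopB (a.set j (a.getD c 0)) n c v
  else a.set j v
termination_by n - j
decreasing_by
  simp only [c, child] at *
  split_ifs at * <;> omega

def siftDownB (a : List Int) (n i : Nat) : List Int :=
  siftLoopB a n i (a.getD i 0)

def pass1B (n : Nat) : Nat → List Int → List (List Int) → List Int × List (List Int)
  | 0, arr, steps => (arr, steps)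
  | k + 1, arr, steps =>
      let arr' := siftDownB arr n k
      pass1B n k arr' (steps ++ [arr'])

def pass2B : Nat → List Int → List (List Int) → List Int × List (List Int)
  | 0, arr, steps => (arr, steps)
  | k + 1, arr, steps =>
      let arr1 := (arr.set (k + 1) (arr.getD 0 0)).set 0 (arr.getD (k + 1) 0)
      let arr2 := siftDownB arr1 (k + 1) 0
      pass2B k arr2 (steps ++ [arr2])

def heap_sort_with_steps_alt (arr : List Int) : List Int × List (List Int) :=
  let n := arr.length
  let st1 := pass1B n (n / 2) arr []
  pass2B (n - 1) st1.1 st1.2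

-- ===== PRECONDITION & SPEC =====
def Spec_heap_sort_with_steps (arr : List Int) (out : List Int × List (List Int)) : Prop := out = heap_sort_with_steps_alt arr
instance (arr : List Int) (out : List Int × List (List Int)) : Decidable (Spec_heap_sort_with_steps arr out) := by unfold Spec_heap_sort_with_steps; infer_instance

-- ===== CLAIM (what is proved, stated in full; the proofs are below) =====
def Claim_equal_heap_sort_with_steps : Prop := ∀ (arr : List Int), Dom_heap_sort_with_steps arr → Spec_heap_sort_with_steps arr (heap_sort_with_steps arr)

-- ===== LEMMAS AND PROOFS =====

theorem getD_set_ne (a : List Int) (j k : Nat) (v : Int) (h : k ≠ j) :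
    (a.set j v).getD k 0 = a.getD k 0 := by
  simp [List.getD, List.getElem?_set_ne (Ne.symm h)]

theorem getD_set_self (a : List Int) (j : Nat) (v : Int) (h : j < a.length) :
    (a.set j v).getD j 0 = v := by
  simp [List.getD, h]

theorem set_getD_self (a : List Int) (j : Nat) (h : j < a.length) :
    a.set j (a.getD j 0) = a := by
  simp [List.getD, List.getElem?_eq_getElem h, List.set_getElem_self]

theorem heapifyA_len (m : Nat) : ∀ (arr : List Int) (n i : Nat), n - i ≤ m →
    (heapifyA arr n i).length = arr.length := by
  induction m with
  | zero =>
      intro arr n i h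
      rw [heapifyA]
      split_ifs <;> first | rfl | omega
  | succ m ih =>
      intro arr n i h
      rw [heapifyA]
      split_ifs <;> try rfl
      all_goals first
        | omega
        | (rw [ih _ _ _ (by omega)]; simp)

-- core: the hole-method loop equals A's swap recursion once the pending write is applied
theorem sift_eq_heapify (m : Nat) : ∀ (a : List Int) (n j : Nat) (v : Int),
    n - j ≤ m → n ≤ a.length → j < a.length →
    siftLoopB a n j v = heapifyA (a.set j v) n j := by
  induction m with
  | zero =>
      intro a n j v h hn hj
      rw [siftLoopB, heapifyA]
      split_ifs <;> first | rfl | omega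
  | succ m ih =>
      intro a n j v h hn hj
      have e1 : (a.set j v).getD (2*j+1) 0 = a.getD (2*j+1) 0 := getD_set_ne _ _ _ _ (by omega)
      have e2 : (a.set j v).getD (2*j+2) 0 = a.getD (2*j+2) 0 := getD_set_ne _ _ _ _ (by omega)
      have e3 : (a.set j v).getD j 0 = v := getD_set_self _ _ _ hj
      have e4 : 2*j+1+1 = 2*j+2 := by omega
      rw [siftLoopB, heapifyA]
      simp only [e1, e2, e3, e4]
      split_ifs <;>
        first
          | rfl
          | omega
          | (simp only [List.set_set, e1, e2, e3, e4] at *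
             first
               | omega
               | (rw [ih _ _ _ _ (by omega) (by simpa using hn) (by simp; omega), List.set_set])
               | (rw [ih _ _ _ _ (by omega) (by simpa using hn) (by simp; omega)]))

theorem siftDown_eq (a : List Int) (n i : Nat) (hn : n ≤ a.length) (hi : i < a.length) :
    siftDownB a n i = heapifyA a n i := by
  rw [siftDownB, sift_eq_heapify (n - i) a n i _ (le_refl _) hn hi, set_getD_self a i hi]

theorem pass1_eq (n : Nat) : ∀ (f : Nat) (arr : List Int) (steps : List (List Int)),
    n ≤ arr.length → f ≤ arr.length →
    pass1B n f arr steps = pass1A n f arr steps := by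
  intro f
  induction f with
  | zero => intro arr steps _ _; rfl
  | succ k ih =>
      intro arr steps hn hf
      rw [pass1B, pass1A]
      simp only [siftDown_eq arr n k hn (by omega)]
      exact ih _ _ (by rw [heapifyA_len (n - k) _ _ _ (le_refl _)]; exact hn)
        (by rw [heapifyA_len (n - k) _ _ _ (le_refl _)]; omega)

theorem pass1A_length (n : Nat) : ∀ (f : Nat) (arr : List Int) (steps : List (List Int)),
    (pass1A n f arr steps).1.length = arr.length := by
  intro f
  induction f with
  | zero => intro arr steps; rfl
  | succ k ih =>
      intro arr steps
      rw [pass1A, ih, heapifyA_len (n - k) _ _ _ (le_refl _)]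

theorem pass2_eq : ∀ (f : Nat) (arr : List Int) (steps : List (List Int)),
    f < arr.length →
    pass2B f arr steps = pass2A f arr steps := by
  intro f
  induction f with
  | zero => intro arr steps _; rfl
  | succ k ih =>
      intro arr steps hf
      rw [pass2B, pass2A]
      have hl : ((arr.set (k+1) (arr.getD 0 0)).set 0 (arr.getD (k+1) 0)).length = arr.length := by simp
      simp only [siftDown_eq ((arr.set (k+1) (arr.getD 0 0)).set 0 (arr.getD (k+1) 0)) (k+1) 0
        (by omega) (by omega)]
      exact ih _ _ (by rw [heapifyA_len (k+1) _ _ _ (by omega)]; omega)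

theorem heap_sort_eq_alt (arr : List Int) : heap_sort_with_steps arr = heap_sort_with_steps_alt arr := by
  rw [heap_sort_with_steps, heap_sort_with_steps_alt]
  simp only [pass1_eq arr.length (arr.length / 2) arr [] (le_refl _) (by omega)]
  rcases Nat.eq_zero_or_pos arr.length with h0 | h0
  · have : arr = [] := List.eq_nil_of_length_eq_zero h0
    subst this; rfl
  · rw [pass2_eq (arr.length - 1) _ _ (by rw [pass1A_length]; omega)]

-- ===== VERDICT (by name: the statement is the Claim_ definition above) =====
theorem heap_sort_with_steps_spec : Claim_equal_heap_sort_with_steps := by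
  intro arr _
  unfold Spec_heap_sort_with_steps
  exact heap_sort_eq_alt arr
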